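-- pv_equiv track=rewrite | github.com/GriRet/Adversarial-Sudoku | sudoku_gametree.py | order_cells
-- ===== SOURCE A (Python) =====
-- from math import sqrt
--
-- def order_cells(board: list[list[int]]) -> list[tuple[tuple[int, int], int]]:
--     """
--     Order the empty cells by their degree from lowest to highest
--     degree = number of empty cells in the same row + column + block
--     """
--     unordered = []
--     index = 0
--     for i in range(len(board)):
--         for j in range(len(board)):
--             if board[i][j] == 0:
--                 unordered.append(((i, j), find_degree(board, (i, j))))
--                 index += 1
--
--     unordered.sort(key=lambda tup: tup[1])
--     return unordered
--
-- def find_degree(board: list[list[int]], position: tuple[int, int]) -> int: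
--     """
--     Find the degree of the given cell
--     """
--     count = 0
--     for k in range(len(board)):
--         if board[position[0]][k] == 0:
--             count += 1
--         if board[k][position[1]] == 0:
--             count += 1
--
--     block_length = int(sqrt(len(board)))
--     start_r = position[0] // block_length
--     start_c = position[1] // block_length
--
--     for i in range(start_r, start_r + block_length):
--         for j in range(start_c, start_c + block_length):
--             if board[i][j] == 0:
--                 count += 1
--
--     return count
-- ===== SOURCE B (Python) =====
-- from math import sqrt
--
-- def order_cells(board: list[list[int]]) -> list[tuple[tuple[int, int], int]]:
--     """
--     Order the empty cells by their degree (empties in same row + column +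
--     block region), lowest first.  Precomputes per-row counts, per-column
--     counts and per-row prefix sums of empties so each cell's degree is
--     looked up instead of rescanned.
--     """
--     n = len(board)
--     rowcnt = [sum(1 for j in range(n) if board[i][j] == 0) for i in range(n)]
--     colcnt = [sum(1 for i in range(n) if board[i][j] == 0) for j in range(n)]
--     # pref[i][t] = number of empties among board[i][0:t]
--     pref = []
--     for i in range(n):
--         p = [0]
--         c = 0
--         for j in range(n):
--             if board[i][j] == 0:
--                 c += 1
--             p.append(c)
--         pref.append(p)
--     bl = int(sqrt(n))
--     cells = []
--     for i in range(n):
--         for j in range(n):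
--             if board[i][j] == 0:
--                 sr = i // bl
--                 sc = j // bl
--                 blocksum = sum(pref[r][sc + bl] - pref[r][sc]
--                                for r in range(sr, sr + bl))
--                 cells.append(((i, j), rowcnt[i] + colcnt[j] + blocksum))
--     cells.sort(key=lambda t: t[1])
--     return cells
-- ===== Notes on version B (the rewrite author's own statement) =====
-- stated objective: alternative
-- what changed: Instead of rescanning the row, the column and the block region for every empty cell, B precomputes per-row empty counts, per-column empty counts and per-row prefix sums of empties once, and each cell's degree becomes two table lookups plus a sum of prefix differences over the block rows; asymptotically O(n^2.5) vs A's O(n^3) per-empty-cell rescans, but on boards with few empty cells the table building costs more than A's rare rescans, so no speed is claimed.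
import Mathlib
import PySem

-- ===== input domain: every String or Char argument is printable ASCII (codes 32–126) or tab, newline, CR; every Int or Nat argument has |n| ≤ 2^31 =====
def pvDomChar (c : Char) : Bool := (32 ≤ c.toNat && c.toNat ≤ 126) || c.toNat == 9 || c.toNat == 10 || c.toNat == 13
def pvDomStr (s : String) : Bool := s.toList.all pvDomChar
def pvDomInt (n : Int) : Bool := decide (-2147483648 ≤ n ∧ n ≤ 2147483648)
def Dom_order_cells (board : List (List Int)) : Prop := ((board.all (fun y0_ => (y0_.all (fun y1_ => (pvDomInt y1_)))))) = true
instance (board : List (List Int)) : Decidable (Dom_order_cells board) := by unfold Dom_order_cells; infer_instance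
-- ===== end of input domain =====

-- B replaces A's per-cell rescans of the row, column and block region by tables
-- (row counts, column counts, per-row prefix sums of empties) built once; same return value.

-- ===== PORT A =====
-- board[i][j]: out of range returns the default (Python would raise IndexError there;
-- such boards are excluded by Pre_order_cells, so the default is never reached inside Pre_).
def pvCell (b : List (List Int)) (i j : Int) : Int :=
  PySem.List.pyGetD (PySem.List.pyGetD b i []) j 1

def find_degree (b : List (List Int)) (pos : Int × Int) : Int :=
  let n : Int := b.length
  let count : Int := (PySem.List.pyRange 0 n 1).foldl (fun c k =>
    let c := if pvCell b pos.1 k = 0 then c + 1 else c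
    if pvCell b k pos.2 = 0 then c + 1 else c) 0
  -- int(sqrt(len(board))) ported as Nat.sqrt: exact for every list length < 2^52
  let bl : Int := (Nat.sqrt b.length : Int)
  let sr := PySem.Int.floordiv pos.1 bl
  let sc := PySem.Int.floordiv pos.2 bl
  (PySem.List.pyRange sr (sr + bl) 1).foldl (fun c i =>
    (PySem.List.pyRange sc (sc + bl) 1).foldl (fun c j =>
      if pvCell b i j = 0 then c + 1 else c) c) count

def order_cells (board : List (List Int)) : List ((Int × Int) × Int) :=
  let n : Int := board.length
  let st := (PySem.List.pyRange 0 n 1).foldl (fun st i =>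
      (PySem.List.pyRange 0 n 1).foldl (fun (st : List ((Int × Int) × Int) × Int) j =>
        if pvCell board i j = 0 then
          (st.1 ++ [((i, j), find_degree board (i, j))], st.2 + 1)
        else st) st)
    ([], 0)
  PySem.List.sorted st.1 (fun t => t.2)

-- ===== PORT B =====
def order_cells_alt (board : List (List Int)) : List ((Int × Int) × Int) :=
  let n : Int := board.length
  let rowcnt : List Int := (PySem.List.pyRange 0 n 1).map (fun i =>
    (((PySem.List.pyRange 0 n 1).filter (fun j => decide (pvCell board i j = 0))).map
      (fun _ => (1 : Int))).sum)
  let colcnt : List Int := (PySem.List.pyRange 0 n 1).map (fun j =>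
    (((PySem.List.pyRange 0 n 1).filter (fun i => decide (pvCell board i j = 0))).map
      (fun _ => (1 : Int))).sum)
  let pref : List (List Int) := (PySem.List.pyRange 0 n 1).foldl (fun pref i =>
    let pc := (PySem.List.pyRange 0 n 1).foldl (fun (pc : List Int × Int) j =>
      let c := if pvCell board i j = 0 then pc.2 + 1 else pc.2
      (pc.1 ++ [c], c)) ([0], 0)
    pref ++ [pc.1]) []
  -- int(sqrt(len(board))) ported as Nat.sqrt: exact for every list length < 2^52
  let bl : Int := (Nat.sqrt board.length : Int)
  let cells := (PySem.List.pyRange 0 n 1).foldl (fun cells i =>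
    (PySem.List.pyRange 0 n 1).foldl (fun (cells : List ((Int × Int) × Int)) j =>
      if pvCell board i j = 0 then
        let sr := PySem.Int.floordiv i bl
        let sc := PySem.Int.floordiv j bl
        let blocksum := ((PySem.List.pyRange sr (sr + bl) 1).map (fun r =>
          PySem.List.pyGetD (PySem.List.pyGetD pref r []) (sc + bl) 0
          - PySem.List.pyGetD (PySem.List.pyGetD pref r []) sc 0)).sum
        cells ++ [((i, j),
          PySem.List.pyGetD rowcnt i 0 + PySem.List.pyGetD colcnt j 0 + blocksum)]
      else cells) cells) []
  PySem.List.sorted cells (fun t => t.2)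

-- ===== PRECONDITION & SPEC =====
-- Pre_ excludes exactly the ragged boards with a row shorter than the board, on which
-- Python A (and B) raise IndexError.
def Pre_order_cells (board : List (List Int)) : Prop :=
  ∀ row ∈ board, board.length ≤ row.length
instance (board : List (List Int)) : Decidable (Pre_order_cells board) := by
  unfold Pre_order_cells; infer_instance

def pvWitness_order_cells : List (List Int) := [[0, 1], [2, 0]]

def Spec_order_cells (board : List (List Int)) (out : List ((Int × Int) × Int)) : Prop := out = order_cells_alt board
instance (board : List (List Int)) (out : List ((Int × Int) × Int)) : Decidable (Spec_order_cells board out) := by unfold Spec_order_cells; infer_instance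

-- ===== CLAIM (what is proved, stated in full; the proofs are below) =====
def Claim_equal_order_cells : Prop := ∀ (board : List (List Int)), Dom_order_cells board → Pre_order_cells board → Spec_order_cells board (order_cells board)

-- ===== LEMMAS AND PROOFS =====

-- count of empties of row i among columns a..c-1
def pvZ (b : List (List Int)) (i a c : Int) : Nat :=
  List.countP (fun j => decide (pvCell b i j = 0)) (PySem.List.pyRange a c 1)

-- count of empties of column j among rows 0..n-1
def pvColC (b : List (List Int)) (j : Int) : Nat :=
  List.countP (fun k => decide (pvCell b k j = 0)) (PySem.List.pyRange 0 (b.length : Int) 1)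

theorem pv_foldl_count_prop {α : Type} (p : α → Prop) [DecidablePred p] (l : List α) (a : Int) :
    l.foldl (fun c x => if p x then c + 1 else c) a
      = a + (List.countP (fun x => decide (p x)) l : Int) := by
  induction l generalizing a with
  | nil => simp
  | cons x t ih => by_cases h : p x <;> simp [h, ih] <;> omega

theorem pvA_deg (b : List (List Int)) (i j : Int) :
    find_degree b (i, j)
      = (pvZ b i 0 (b.length : Int) : Int) + (pvColC b j : Int)
        + ((PySem.List.pyRange (PySem.Int.floordiv i (Nat.sqrt b.length : Int))
              (PySem.Int.floordiv i (Nat.sqrt b.length : Int) + (Nat.sqrt b.length : Int)) 1).map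
            (fun r => (pvZ b r (PySem.Int.floordiv j (Nat.sqrt b.length : Int))
              (PySem.Int.floordiv j (Nat.sqrt b.length : Int) + (Nat.sqrt b.length : Int)) : Int))).sum := by
  unfold find_degree
  simp only []
  have hcount : List.foldl (fun c k =>
      if pvCell b k j = 0 then (if pvCell b i k = 0 then c + 1 else c) + 1
      else if pvCell b i k = 0 then c + 1 else c) 0 (PySem.List.pyRange 0 (b.length : Int) 1)
      = (pvZ b i 0 (b.length : Int) : Int) + (pvColC b j : Int) := by
    rw [PySem.List.foldl_congr_mem _ _ (fun c k =>
        c + ((if decide (pvCell b i k = 0) = true then (1:Int) else 0)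
           + (if decide (pvCell b k j = 0) = true then (1:Int) else 0))) _
        (by intro acc x _
            by_cases h1 : pvCell b i x = 0 <;> by_cases h2 : pvCell b x j = 0 <;>
              simp [h1, h2] <;> ring)]
    rw [PySem.List.foldl_add, PySem.List.sum_map_add_int,
        PySem.List.sum_map_ite_one_zero, PySem.List.sum_map_ite_one_zero]
    unfold pvZ pvColC
    ring
  have hblock : ∀ a : Int, List.foldl (fun c r =>
      List.foldl (fun c j' => if pvCell b r j' = 0 then c + 1 else c) c
        (PySem.List.pyRange (PySem.Int.floordiv j (Nat.sqrt b.length : Int))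
          (PySem.Int.floordiv j (Nat.sqrt b.length : Int) + (Nat.sqrt b.length : Int)) 1)) a
      (PySem.List.pyRange (PySem.Int.floordiv i (Nat.sqrt b.length : Int))
        (PySem.Int.floordiv i (Nat.sqrt b.length : Int) + (Nat.sqrt b.length : Int)) 1)
      = a + ((PySem.List.pyRange (PySem.Int.floordiv i (Nat.sqrt b.length : Int))
              (PySem.Int.floordiv i (Nat.sqrt b.length : Int) + (Nat.sqrt b.length : Int)) 1).map
            (fun r => (pvZ b r (PySem.Int.floordiv j (Nat.sqrt b.length : Int))
              (PySem.Int.floordiv j (Nat.sqrt b.length : Int) + (Nat.sqrt b.length : Int)) : Int))).sum := by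
    intro a
    rw [PySem.List.foldl_congr_mem _ _ (fun c r =>
        c + (pvZ b r (PySem.Int.floordiv j (Nat.sqrt b.length : Int))
              (PySem.Int.floordiv j (Nat.sqrt b.length : Int) + (Nat.sqrt b.length : Int)) : Int)) _
        (by intro acc r _
            rw [pv_foldl_count_prop (fun x => pvCell b r x = 0)]
            rfl)]
    rw [PySem.List.foldl_add]
  rw [hblock, hcount]

theorem pvZ_succ (b : List (List Int)) (i : Int) (m : Nat) :
    pvZ b i 0 ((m : Int) + 1) = pvZ b i 0 (m : Int) + (if pvCell b i (m : Int) = 0 then 1 else 0) := by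
  unfold pvZ
  rw [PySem.List.pyRange_one_succ_right (by positivity)]
  by_cases h : pvCell b i (m : Int) = 0 <;> simp [List.countP_append, h]

theorem pvPref_fold (b : List (List Int)) (i : Int) (m : Nat) :
    (PySem.List.pyRange 0 (m : Int) 1).foldl (fun (pc : List Int × Int) j =>
        let c := if pvCell b i j = 0 then pc.2 + 1 else pc.2
        (pc.1 ++ [c], c)) ([0], 0)
      = ((List.range (m + 1)).map (fun t : Nat => (pvZ b i 0 (t : Int) : Int)), (pvZ b i 0 (m : Int) : Int)) := by
  induction m with
  | zero => simp [pvZ]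
  | succ k ih =>
    rw [show ((k + 1 : Nat) : Int) = (k : Int) + 1 by push_cast; ring,
        PySem.List.pyRange_one_succ_right (by positivity), List.foldl_append, ih]
    simp only [List.foldl_cons, List.foldl_nil]
    have h := pvZ_succ b i k
    have hc : ((k + 1 : Nat) : Int) = (k : Int) + 1 := by push_cast; ring
    by_cases hp : pvCell b i (k : Int) = 0 <;> simp [List.range_succ, hc, h, hp]

theorem pvZ_split (b : List (List Int)) (i a c : Int) (h0 : 0 ≤ a) (hac : a ≤ c) :
    (pvZ b i 0 c : Int) - (pvZ b i 0 a : Int) = (pvZ b i a c : Int) := by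
  unfold pvZ
  rw [PySem.List.pyRange_one_append 0 a c h0 hac, List.countP_append]
  push_cast
  ring

theorem pv_sqrt_block (nN iN : Nat) (h : iN < nN) :
    iN / Nat.sqrt nN + Nat.sqrt nN ≤ nN := by
  set s := Nat.sqrt nN with hs
  have hs1 : 1 ≤ s := by
    have := Nat.sqrt_pos.mpr (by omega : 0 < nN)
    omega
  have hss : s * s ≤ nN := by simpa [pow_two] using Nat.sqrt_le' nN
  have hsn : s ≤ nN := le_trans (Nat.le_mul_of_pos_left s hs1) hss
  have hq : iN / s * s ≤ iN := Nat.div_mul_le_self _ _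
  rcases Nat.lt_or_ge s 2 with hlt | hge
  · have h1 : s = 1 := by omega
    rw [h1]
    omega
  · by_contra hcon
    have h1 : nN - s + 1 ≤ iN / s := by omega
    have h2 : (nN - s + 1) * s ≤ iN / s * s := Nat.mul_le_mul_right _ h1
    have h3 : (nN - s) * 2 ≤ (nN - s) * s := Nat.mul_le_mul_left _ hge
    have h4 : (nN - s + 1) * s = (nN - s) * s + s := by ring
    omega

theorem pvSr_bounds (b : List (List Int)) (i : Int) (h0 : 0 ≤ i) (hn : i < (b.length : Int)) :
    0 ≤ PySem.Int.floordiv i (Nat.sqrt b.length : Int)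
      ∧ PySem.Int.floordiv i (Nat.sqrt b.length : Int) + (Nat.sqrt b.length : Int) ≤ (b.length : Int) := by
  obtain ⟨iN, rfl⟩ : ∃ m : Nat, i = (m : Int) := ⟨i.toNat, (Int.toNat_of_nonneg h0).symm⟩
  rw [PySem.Int.floordiv_natCast]
  have h2 := pv_sqrt_block b.length iN (by exact_mod_cast hn)
  exact ⟨Int.natCast_nonneg _, by exact_mod_cast h2⟩

theorem pvA_pair (b : List (List Int)) (i : Int) (l : List Int) (st : List ((Int × Int) × Int) × Int) :
    l.foldl (fun st j => if pvCell b i j = 0 then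
        (st.1 ++ [((i, j), find_degree b (i, j))], st.2 + 1) else st) st
      = (l.foldl (fun acc j => if pvCell b i j = 0 then
            acc ++ [((i, j), find_degree b (i, j))] else acc) st.1,
         l.foldl (fun c j => if pvCell b i j = 0 then c + 1 else c) st.2) := by
  induction l generalizing st with
  | nil => simp
  | cons x tl ih => by_cases h : pvCell b i x = 0 <;> simp [h, ih]

-- ===== VERDICT (by name: the statement is the Claim_ definition above) =====

def pvPrefExpr (board : List (List Int)) : List (List Int) :=
  List.foldl (fun pref i => pref ++
    [(List.foldl (fun (pc : List Int × Int) j =>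
        (pc.1 ++ [if pvCell board i j = 0 then pc.2 + 1 else pc.2],
         if pvCell board i j = 0 then pc.2 + 1 else pc.2)) ([0], 0)
        (PySem.List.pyRange 0 (board.length : Int) 1)).1])
    [] (PySem.List.pyRange 0 (board.length : Int) 1)

def pvBexpr (board : List (List Int)) (i j : Int) : (Int × Int) × Int :=
  ((i, j),
    PySem.List.pyGetD ((PySem.List.pyRange 0 (board.length : Int) 1).map (fun i =>
      (((PySem.List.pyRange 0 (board.length : Int) 1).filter
          (fun j => decide (pvCell board i j = 0))).map (fun _ => (1 : Int))).sum)) i 0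
  + PySem.List.pyGetD ((PySem.List.pyRange 0 (board.length : Int) 1).map (fun j =>
      (((PySem.List.pyRange 0 (board.length : Int) 1).filter
          (fun i => decide (pvCell board i j = 0))).map (fun _ => (1 : Int))).sum)) j 0
  + ((PySem.List.pyRange (PySem.Int.floordiv i (Nat.sqrt board.length : Int))
        (PySem.Int.floordiv i (Nat.sqrt board.length : Int) + (Nat.sqrt board.length : Int)) 1).map
      (fun r =>
        PySem.List.pyGetD (PySem.List.pyGetD (pvPrefExpr board) r [])
          (PySem.Int.floordiv j (Nat.sqrt board.length : Int) + (Nat.sqrt board.length : Int)) 0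
      - PySem.List.pyGetD (PySem.List.pyGetD (pvPrefExpr board) r [])
          (PySem.Int.floordiv j (Nat.sqrt board.length : Int)) 0)).sum)

theorem pvPref_fold' (b : List (List Int)) (i : Int) (m : Nat) :
    (PySem.List.pyRange 0 (m : Int) 1).foldl (fun (pc : List Int × Int) j =>
        (pc.1 ++ [if pvCell b i j = 0 then pc.2 + 1 else pc.2],
         if pvCell b i j = 0 then pc.2 + 1 else pc.2)) ([0], 0)
      = ((List.range (m + 1)).map (fun t : Nat => (pvZ b i 0 (t : Int) : Int)), (pvZ b i 0 (m : Int) : Int)) := by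
  rw [← pvPref_fold b i m]

theorem pvPref_lookup' (b : List (List Int)) (r t : Int)
    (hr0 : 0 ≤ r) (hrn : r < (b.length : Int)) (ht0 : 0 ≤ t) (htn : t ≤ (b.length : Int)) :
    PySem.List.pyGetD (PySem.List.pyGetD (pvPrefExpr b) r []) t 0 = (pvZ b r 0 t : Int) := by
  unfold pvPrefExpr
  rw [show (fun (pref : List (List Int)) (i : Int) => pref ++
        [(List.foldl (fun (pc : List Int × Int) j =>
            (pc.1 ++ [if pvCell b i j = 0 then pc.2 + 1 else pc.2],
             if pvCell b i j = 0 then pc.2 + 1 else pc.2)) ([0], 0)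
            (PySem.List.pyRange 0 (b.length : Int) 1)).1])
      = (fun (pref : List (List Int)) (i : Int) => pref ++ [(List.range (b.length + 1)).map
          (fun u : Nat => (pvZ b i 0 (u : Int) : Int))]) from funext fun pref => funext fun i => by
        rw [pvPref_fold' b i b.length]]
  rw [PySem.List.foldl_append_singleton_eq_map]
  rw [show ([] : List (List Int)) ++ _ = List.map (fun i => (List.range (b.length + 1)).map
        (fun u : Nat => (pvZ b i 0 (u : Int) : Int))) (PySem.List.pyRange 0 (b.length : Int) 1) from List.nil_append _]
  rw [PySem.List.pyGetD_map_pyRange_of_nonneg _ _ _ _ hr0 hrn]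
  obtain ⟨tN, rfl⟩ : ∃ m : Nat, t = (m : Int) := ⟨t.toNat, (Int.toNat_of_nonneg ht0).symm⟩
  rw [PySem.List.pyGetD_natCast, PySem.List.getD_map_range _ _ _ _
    (by exact_mod_cast Nat.lt_succ_of_le (by exact_mod_cast htn))]

theorem pvB_cell (board : List (List Int)) (i j : Int)
    (hi0 : 0 ≤ i) (hin : i < (board.length : Int))
    (hj0 : 0 ≤ j) (hjn : j < (board.length : Int)) :
    ((i, j), find_degree board (i, j)) = pvBexpr board i j := by
  have hsri := pvSr_bounds board i hi0 hin
  have hsrj := pvSr_bounds board j hj0 hjn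
  have hbl0 : (0 : Int) ≤ (Nat.sqrt board.length : Int) := Int.natCast_nonneg _
  have hrow : PySem.List.pyGetD ((PySem.List.pyRange 0 (board.length : Int) 1).map (fun i =>
      (((PySem.List.pyRange 0 (board.length : Int) 1).filter
          (fun j => decide (pvCell board i j = 0))).map (fun _ => (1 : Int))).sum)) i 0
      = (pvZ board i 0 (board.length : Int) : Int) := by
    rw [PySem.List.pyGetD_map_pyRange_of_nonneg _ _ _ _ hi0 hin, PySem.List.sum_map_const_int]
    simp [pvZ, List.countP_eq_length_filter]
  have hcol : PySem.List.pyGetD ((PySem.List.pyRange 0 (board.length : Int) 1).map (fun j =>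
      (((PySem.List.pyRange 0 (board.length : Int) 1).filter
          (fun i => decide (pvCell board i j = 0))).map (fun _ => (1 : Int))).sum)) j 0
      = (pvColC board j : Int) := by
    rw [PySem.List.pyGetD_map_pyRange_of_nonneg _ _ _ _ hj0 hjn, PySem.List.sum_map_const_int]
    simp [pvColC, List.countP_eq_length_filter]
  have hblk : ∀ r ∈ PySem.List.pyRange (PySem.Int.floordiv i (Nat.sqrt board.length : Int))
      (PySem.Int.floordiv i (Nat.sqrt board.length : Int) + (Nat.sqrt board.length : Int)) 1,
      PySem.List.pyGetD (PySem.List.pyGetD (pvPrefExpr board) r [])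
          (PySem.Int.floordiv j (Nat.sqrt board.length : Int) + (Nat.sqrt board.length : Int)) 0
        - PySem.List.pyGetD (PySem.List.pyGetD (pvPrefExpr board) r [])
          (PySem.Int.floordiv j (Nat.sqrt board.length : Int)) 0
      = (pvZ board r (PySem.Int.floordiv j (Nat.sqrt board.length : Int))
          (PySem.Int.floordiv j (Nat.sqrt board.length : Int) + (Nat.sqrt board.length : Int)) : Int) := by
    intro r hr
    rw [PySem.List.mem_pyRange_one] at hr
    have hr0 : 0 ≤ r := le_trans hsri.1 hr.1
    have hrn : r < (board.length : Int) := lt_of_lt_of_le hr.2 hsri.2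
    rw [pvPref_lookup' board r _ hr0 hrn (by omega) hsrj.2,
        pvPref_lookup' board r _ hr0 hrn hsrj.1 (by omega),
        pvZ_split board r _ _ hsrj.1 (by omega)]
  unfold pvBexpr
  rw [pvA_deg board i j, hrow, hcol, List.map_congr_left hblk]

theorem pv_flatMap_congr {α β : Type} (l : List α) (f g : α → List β)
    (h : ∀ x ∈ l, f x = g x) : l.flatMap f = l.flatMap g := by
  induction l with
  | nil => rfl
  | cons x tl ih =>
    simp only [List.flatMap_cons]
    rw [h x (by simp), ih (fun y hy => h y (by simp [hy]))]

theorem order_cells_spec : Claim_equal_order_cells := by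
  intro board _ _
  unfold Spec_order_cells order_cells order_cells_alt
  simp only []
  congr 1
  have hfst : ∀ (l : List Int) (st : List ((Int × Int) × Int) × Int),
      (l.foldl (fun st i => List.foldl (fun st j => if pvCell board i j = 0 then
          (st.1 ++ [((i, j), find_degree board (i, j))], st.2 + 1) else st) st
          (PySem.List.pyRange 0 (board.length : Int) 1)) st).1
      = l.foldl (fun acc i => List.foldl (fun acc j => if pvCell board i j = 0 then
          acc ++ [((i, j), find_degree board (i, j))] else acc) acc
          (PySem.List.pyRange 0 (board.length : Int) 1)) st.1 := by
    intro l
    induction l with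
    | nil => intro st; rfl
    | cons x tl ih =>
      intro st
      simp only [List.foldl_cons]
      rw [pvA_pair board x (PySem.List.pyRange 0 (board.length : Int) 1) st]
      exact ih _
  rw [hfst (PySem.List.pyRange 0 (board.length : Int) 1) ([], 0)]
  rw [PySem.List.foldl_congr_mem _ _ (fun (acc : List ((Int × Int) × Int)) i =>
      acc ++ List.map (fun j => ((i, j), find_degree board (i, j)))
        (List.filter (fun j => decide (pvCell board i j = 0))
          (PySem.List.pyRange 0 (board.length : Int) 1))) _
      (fun acc i _ => PySem.List.foldl_append_ite _ _ _ _)]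
  rw [PySem.List.foldl_append_eq_flatMap]
  show ([] : List ((Int × Int) × Int)) ++
      List.flatMap (fun i =>
        List.map (fun j => ((i, j), find_degree board (i, j)))
          (List.filter (fun j => decide (pvCell board i j = 0))
            (PySem.List.pyRange 0 (board.length : Int) 1)))
        (PySem.List.pyRange 0 (board.length : Int) 1)
    = List.foldl (fun cells i =>
        List.foldl (fun (cells : List ((Int × Int) × Int)) j =>
          if pvCell board i j = 0 then cells ++ [pvBexpr board i j] else cells) cells
          (PySem.List.pyRange 0 (board.length : Int) 1)) []
        (PySem.List.pyRange 0 (board.length : Int) 1)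
  rw [PySem.List.foldl_congr_mem _ _ (fun (cells : List ((Int × Int) × Int)) i =>
      cells ++ List.map (fun j => pvBexpr board i j)
        (List.filter (fun j => decide (pvCell board i j = 0))
          (PySem.List.pyRange 0 (board.length : Int) 1))) _
      (fun acc i _ => PySem.List.foldl_append_ite _ (fun j => pvBexpr board i j) _ _)]
  rw [PySem.List.foldl_append_eq_flatMap]
  simp only [List.nil_append]
  refine pv_flatMap_congr _ _ _ (fun i hi => List.map_congr_left (fun j hj => ?_))
  rw [PySem.List.mem_pyRange_one] at hi
  rw [List.mem_filter, PySem.List.mem_pyRange_one] at hj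
  exact pvB_cell board i j hi.1 hi.2 hj.1.1 hj.1.2
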